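-- pv_equiv track=rewrite | github.com/sourav9064/coding-practice | coding_33.py | ballPositionFinder
-- ===== SOURCE A (Python) =====
-- def ballPositionFinder(dim_holes, dim_balls):
--     max_hole_limit_counter = []
--     position_value = []
--     ball_positions = []
--
--     for i in range(1, len(dim_holes)+1):
--         max_hole_limit_counter.append(i)
--         position_value.append(i)
--
--     for i in range(0,len(dim_balls)):
--         for j in range(1,len(dim_holes)+1):
--             if (dim_holes[-j] >= dim_balls[i]) and (max_hole_limit_counter[-j] != 0):
--                 ball_positions.append(position_value[-j])
--                 max_hole_limit_counter[-j] -= 1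
--                 break
--             if j == len(dim_holes):
--                 ball_positions.append(0)
--                 break
--     return ball_positions
-- ===== SOURCE B (Python) =====
-- def _place(b, alive):
--     # first (i.e. rightmost) alive hole that fits; rebuild the list around it
--     for i, (d, p, c) in enumerate(alive):
--         if d >= b:
--             if c == 1:
--                 return p, alive[:i] + alive[i+1:]
--             return p, alive[:i] + [(d, p, c - 1)] + alive[i+1:]
--     return 0, alive
--
-- def ballPositionFinder(dim_holes, dim_balls):
--     n = len(dim_holes)
--     # alive holes, rightmost first: (dimension, position, remaining capacity)
--     alive = [(dim_holes[k], k + 1, k + 1) for k in range(n - 1, -1, -1)]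
--     result = []
--     for b in dim_balls:
--         pos, alive = _place(b, alive)
--         result.append(pos)
--     return result
-- ===== Notes on version B (the rewrite author's own statement) =====
-- stated objective: alternative
-- what changed: B maintains one shrinking rightmost-first list of alive (dimension, position, remaining-capacity) triples and places each ball into the first fitting entry, deleting a hole when its capacity is exhausted, instead of A's nested index loop with negative indexing over parallel counter/position arrays.
-- intended difference: When dim_holes is empty and dim_balls is not, A's inner loop never runs so A returns [] (fewer entries than balls); B returns 0 for every ball, the intended 'no hole fits' answer. — e.g. on ballPositionFinder([], [1]): A returns [], B returns [0]
import Mathlib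
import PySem

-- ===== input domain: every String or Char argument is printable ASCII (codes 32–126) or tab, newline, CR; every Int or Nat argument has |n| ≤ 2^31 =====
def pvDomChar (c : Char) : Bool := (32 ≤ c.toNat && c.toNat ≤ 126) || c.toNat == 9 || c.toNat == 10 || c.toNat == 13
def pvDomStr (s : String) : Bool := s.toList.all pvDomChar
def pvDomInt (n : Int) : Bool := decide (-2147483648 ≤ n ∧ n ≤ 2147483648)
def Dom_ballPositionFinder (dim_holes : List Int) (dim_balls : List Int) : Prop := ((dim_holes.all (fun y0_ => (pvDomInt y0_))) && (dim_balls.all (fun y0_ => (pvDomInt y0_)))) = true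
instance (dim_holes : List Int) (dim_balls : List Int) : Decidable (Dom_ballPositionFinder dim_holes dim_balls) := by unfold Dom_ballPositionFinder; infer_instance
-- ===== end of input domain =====

-- B maintains one shrinking rightmost-first list of alive (dim, position, capacity) triples instead of
-- A's nested index loop with negative indexing over parallel counter/position arrays (objective: alternative).

-- ===== PORT A =====
-- A's inner 'for j in range(1, len(dim_holes)+1)' loop for one ball b: returns (value appended to
-- ball_positions, if any; updated counter list).  'max_hole_limit_counter[-j] -= 1' is written as
-- .set (counter.length - j) (c - 1): for 1 ≤ j ≤ len this is exactly Python's negative-index assignment.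
def ballPositionFinderInner (dim_holes : List Int) (counter : List Int) (posval : List Int) (b : Int) : Nat → Nat → Option Int × List Int
  | 0, _ => (none, counter)
  | fuel+1, j =>
    if (PySem.List.pyGet? dim_holes (-(j : Int))).getD 0 ≥ b ∧ (PySem.List.pyGet? counter (-(j : Int))).getD 0 ≠ 0 then
      (some ((PySem.List.pyGet? posval (-(j : Int))).getD 0),
       counter.set (counter.length - j) ((PySem.List.pyGet? counter (-(j : Int))).getD 0 - 1))
    else if j = dim_holes.length then
      (some 0, counter)
    else
      ballPositionFinderInner dim_holes counter posval b fuel (j+1)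

def ballPositionFinder (dim_holes : List Int) (dim_balls : List Int) : List Int :=
  -- 'for i in range(1, len(dim_holes)+1): max_hole_limit_counter.append(i); position_value.append(i)'
  let max_hole_limit_counter := PySem.List.pyRange 1 ((dim_holes.length : Int) + 1) 1
  let position_value := PySem.List.pyRange 1 ((dim_holes.length : Int) + 1) 1
  (dim_balls.foldl (fun st b =>
      match ballPositionFinderInner dim_holes st.1 position_value b dim_holes.length 1 with
      | (some v, c') => (c', st.2 ++ [v])
      | (none, c') => (c', st.2))
    (max_hole_limit_counter, ([] : List Int))).2

-- ===== PORT B =====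
-- first (rightmost) alive hole that fits: returns its position and the list with that hole
-- decremented (deleted when its capacity was 1); 0 if none fits.
def placeBall (b : Int) : List (Int × Int × Int) → Int × List (Int × Int × Int)
  | [] => (0, [])
  | (d, p, c) :: rest =>
    if d ≥ b then
      if c = 1 then (p, rest) else (p, (d, p, c - 1) :: rest)
    else
      let r := placeBall b rest
      (r.1, (d, p, c) :: r.2)

def ballPositionFinder_alt (dim_holes : List Int) (dim_balls : List Int) : List Int :=
  let alive := (List.range dim_holes.length).reverse.map
      (fun k => (dim_holes.getD k 0, (k : Int) + 1, (k : Int) + 1))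
  (dim_balls.foldl (fun st b =>
      let r := placeBall b st.1
      (r.2, st.2 ++ [r.1])) (alive, ([] : List Int))).2

-- ===== PRECONDITION & SPEC =====
-- When dim_holes is empty and dim_balls is not, A's inner loop never runs so A returns []
-- (fewer entries than balls); B returns 0 for every ball, the intended 'no hole fits' answer.
def D_ballPositionFinder (dim_holes : List Int) (dim_balls : List Int) : Prop := dim_holes = [] ∧ dim_balls ≠ []
instance (dim_holes : List Int) (dim_balls : List Int) : Decidable (D_ballPositionFinder dim_holes dim_balls) := by unfold D_ballPositionFinder; infer_instance

def Spec_ballPositionFinder (dim_holes : List Int) (dim_balls : List Int) (out : List Int) : Prop := ¬ D_ballPositionFinder dim_holes dim_balls → out = ballPositionFinder_alt dim_holes dim_balls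
instance (dim_holes : List Int) (dim_balls : List Int) (out : List Int) : Decidable (Spec_ballPositionFinder dim_holes dim_balls out) := by unfold Spec_ballPositionFinder; infer_instance

def pvDiffWitness_ballPositionFinder : List Int × List Int := ([], [1])
def pvDiffWitnessOut_ballPositionFinder : (List Int) × (List Int) := ([], [0])

-- ===== CLAIM (what is proved, stated in full; the proofs are below) =====
def Claim_unchanged_ballPositionFinder : Prop := ∀ (dim_holes : List Int) (dim_balls : List Int), Dom_ballPositionFinder dim_holes dim_balls → Spec_ballPositionFinder dim_holes dim_balls (ballPositionFinder dim_holes dim_balls)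
def Claim_changed_ballPositionFinder : Prop := Dom_ballPositionFinder (pvDiffWitness_ballPositionFinder.1) (pvDiffWitness_ballPositionFinder.2) ∧ D_ballPositionFinder (pvDiffWitness_ballPositionFinder.1) (pvDiffWitness_ballPositionFinder.2) ∧ ballPositionFinder (pvDiffWitness_ballPositionFinder.1) (pvDiffWitness_ballPositionFinder.2) = pvDiffWitnessOut_ballPositionFinder.1 ∧ ballPositionFinder_alt (pvDiffWitness_ballPositionFinder.1) (pvDiffWitness_ballPositionFinder.2) = pvDiffWitnessOut_ballPositionFinder.2 ∧ pvDiffWitnessOut_ballPositionFinder.1 ≠ pvDiffWitnessOut_ballPositionFinder.2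
def Claim_exact_ballPositionFinder : Prop := ∀ (dim_holes : List Int) (dim_balls : List Int), Dom_ballPositionFinder dim_holes dim_balls → D_ballPositionFinder dim_holes dim_balls → ballPositionFinder dim_holes dim_balls ≠ ballPositionFinder_alt dim_holes dim_balls

-- ===== LEMMAS AND PROOFS =====

-- the A-side state (counter list c) seen as the list of (dim, position, capacity) triples
def pvTrips (holes c : List Int) : List (Int × Int × Int) :=
  (List.range holes.length).map (fun k => (holes.getD k 0, (k : Int) + 1, c.getD k 0))

def pvAlive (M : List (Int × Int × Int)) : List (Int × Int × Int) :=
  M.filter (fun t => t.2.2 != 0)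

-- A's inner loop recast as a structural recursion over the reversed triple list
def pvScanA (b : Int) : List (Int × Int × Int) → Option Int × List (Int × Int × Int)
  | [] => (none, [])
  | t :: rest =>
    if b ≤ t.1 ∧ t.2.2 ≠ 0 then (some t.2.1, (t.1, t.2.1, t.2.2 - 1) :: rest)
    else if rest = [] then (some 0, t :: rest)
    else
      let r := pvScanA b rest
      (r.1, t :: r.2)

theorem caps_trips (holes c : List Int) (h : c.length = holes.length) :
    (pvTrips holes c).map (fun t => t.2.2) = c := by
  apply List.ext_getElem
  · simp [pvTrips, h]
  intro k h1 h2
  simp [pvTrips, List.getD_eq_getElem?_getD, List.getElem?_eq_getElem h2]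

theorem pvReverseSet {α : Type} (l : List α) (n : Nat) (a : α) (hn : n < l.length) :
    (l.set n a).reverse = l.reverse.set (l.length - 1 - n) a := by
  apply List.ext_getElem
  · simp
  intro k h1 h2
  have hk : k < l.length := by simpa using h1
  simp only [List.getElem_reverse, List.getElem_set, List.length_set]
  split_ifs with hh1 hh2 hh2
  · rfl
  · omega
  · omega
  · rfl

theorem pvTakeSucc {α : Type} (l : List α) (j : Nat) (h : j - 1 < l.length) (h1 : 1 ≤ j) :
    l.take j = l.take (j-1) ++ [l[j-1]] := by
  conv_lhs => rw [show j = (j-1)+1 from by omega]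
  rw [List.take_add_one, List.getElem?_eq_getElem h]
  rfl

theorem inner_eq (holes c pv : List Int) (b : Int)
    (hc : c.length = holes.length)
    (hpv : pv = PySem.List.pyRange 1 ((holes.length : Int) + 1) 1) :
    ∀ fuel j, 1 ≤ j → j + fuel = holes.length + 1 →
    ballPositionFinderInner holes c pv b fuel j =
      ((pvScanA b (((pvTrips holes c).reverse).drop (j-1))).1,
       ((((pvTrips holes c).reverse).take (j-1) ++ (pvScanA b (((pvTrips holes c).reverse).drop (j-1))).2).reverse).map (fun t => t.2.2)) := by
  subst hpv
  have hM : ((pvTrips holes c).reverse).length = holes.length := by simp [pvTrips]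
  have hpvlen : (PySem.List.pyRange 1 ((holes.length : Int) + 1) 1).length = holes.length := by
    simp [PySem.List.length_pyRange_one]
  intro fuel
  induction fuel with
  | zero =>
    intro j hj hlen
    have hj' : j = holes.length + 1 := by omega
    subst hj'
    have hd : ((pvTrips holes c).reverse).drop (holes.length + 1 - 1) = [] :=
      List.drop_eq_nil_of_le (by omega)
    have ht : ((pvTrips holes c).reverse).take (holes.length + 1 - 1) = (pvTrips holes c).reverse :=
      List.take_of_length_le (by omega)
    rw [hd, ht]
    simp [ballPositionFinderInner, pvScanA, caps_trips holes c hc]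
  | succ fuel ih =>
    intro j hj hlen
    have hjpos : 0 < j := hj
    have hjn : j ≤ holes.length := by omega
    have hj1 : j - 1 < ((pvTrips holes c).reverse).length := by rw [hM]; omega
    have e : (j-1)+1 = j := by omega
    have hdrop : ((pvTrips holes c).reverse).drop (j-1) =
        ((pvTrips holes c).reverse)[j-1] :: ((pvTrips holes c).reverse).drop j := by
      rw [List.drop_eq_getElem_cons hj1, e]
    have hMk : ((pvTrips holes c).reverse)[j-1] =
        (holes.getD (holes.length - j) 0, ((holes.length - j : Nat) : Int) + 1, c.getD (holes.length - j) 0) := by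
      rw [List.getElem_reverse]
      simp only [pvTrips, List.getElem_map, List.getElem_range, List.length_map, List.length_range]
      rw [show holes.length - 1 - (j-1) = holes.length - j from by omega]
    have hgh : (PySem.List.pyGet? holes (-(j:Int))).getD 0 = holes.getD (holes.length - j) 0 := by
      rw [PySem.List.pyGet?_neg_natCast holes j hjpos hjn]
      simp [List.getD_eq_getElem?_getD]
    have hgc : (PySem.List.pyGet? c (-(j:Int))).getD 0 = c.getD (holes.length - j) 0 := by
      rw [PySem.List.pyGet?_neg_natCast c j hjpos (by omega), hc]
      simp [List.getD_eq_getElem?_getD]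
    have hgp : (PySem.List.pyGet? (PySem.List.pyRange 1 ((holes.length : Int) + 1) 1) (-(j:Int))).getD 0
        = ((holes.length - j : Nat) : Int) + 1 := by
      rw [PySem.List.pyGet?_neg_natCast _ j hjpos (by rw [hpvlen]; omega)]
      rw [List.getElem?_eq_getElem (by rw [hpvlen]; omega)]
      rw [Option.getD_some, PySem.List.getElem_pyRange_one]
      rw [hpvlen]
      omega
    simp only [ballPositionFinderInner, ge_iff_le, hgh, hgc, hgp]
    rw [hdrop]
    by_cases hcond : b ≤ holes.getD (holes.length - j) 0 ∧ c.getD (holes.length - j) 0 ≠ 0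
    · rw [if_pos hcond]
      simp only [pvScanA, hMk]
      rw [if_pos hcond]
      refine Prod.ext rfl ?_
      simp only
      have hset : ((pvTrips holes c).reverse).take (j-1) ++
          (holes.getD (holes.length - j) 0, ((holes.length - j : Nat) : Int) + 1, c.getD (holes.length - j) 0 - 1) :: ((pvTrips holes c).reverse).drop j =
          ((pvTrips holes c).reverse).set (j-1)
            (holes.getD (holes.length - j) 0, ((holes.length - j : Nat) : Int) + 1, c.getD (holes.length - j) 0 - 1) := by
        rw [List.set_eq_take_append_cons_drop, if_pos hj1, e]
      rw [hset, pvReverseSet _ _ _ hj1, List.reverse_reverse, List.map_set, caps_trips holes c hc]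
      rw [show ((pvTrips holes c).reverse).length - 1 - (j-1) = holes.length - j from by omega]
      rw [hc]
    · rw [if_neg hcond]
      by_cases hje : j = holes.length
      · subst hje
        rw [if_pos rfl]
        have hd0 : ((pvTrips holes c).reverse).drop holes.length = [] :=
          List.drop_eq_nil_of_le (by omega)
        simp only [pvScanA, hMk, hd0]
        rw [if_neg hcond]
        simp only [if_true]
        refine Prod.ext rfl ?_
        simp only
        have hrec2 : ((pvTrips holes c).reverse).take (holes.length - 1) ++
            [((pvTrips holes c).reverse)[holes.length - 1]'hj1] =
            (pvTrips holes c).reverse := by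
          conv_rhs => rw [← List.take_append_drop (holes.length - 1) ((pvTrips holes c).reverse)]
          rw [hdrop, hd0]
        rw [← hMk, hrec2, List.reverse_reverse, caps_trips holes c hc]
      · rw [if_neg hje]
        have hrest : ((pvTrips holes c).reverse).drop j ≠ [] := by
          intro hnil
          have := List.drop_eq_nil_iff.mp hnil
          omega
        have hrec := ih (j+1) (by omega) (by omega)
        rw [hrec]
        simp only [pvScanA, hMk]
        rw [if_neg hcond, if_neg hrest]
        refine Prod.ext rfl ?_
        simp only [Nat.add_sub_cancel]
        rw [pvTakeSucc _ j hj1 hj, List.append_assoc, List.singleton_append, hMk]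

theorem scan_place (b : Int) :
    ∀ M : List (Int × Int × Int), (∀ t ∈ M, 0 ≤ t.2.2) → M ≠ [] →
    ∃ v, (pvScanA b M).1 = some v ∧
      placeBall b (pvAlive M) = (v, pvAlive ((pvScanA b M).2)) := by
  intro M
  induction M with
  | nil => intro _ h; exact absurd rfl h
  | cons hd tl ih =>
    intro hnn _
    obtain ⟨d, p, c⟩ := hd
    have hc : (0:Int) ≤ c := hnn (d, p, c) (by simp)
    by_cases h1 : b ≤ d ∧ c ≠ 0
    · refine ⟨p, by simp [pvScanA, h1], ?_⟩
      by_cases hc1 : c = 1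
      · subst hc1
        simp [pvAlive, pvScanA, h1, placeBall, ge_iff_le]
      · have hcm : c - 1 ≠ 0 := by omega
        simp [pvAlive, pvScanA, h1, placeBall, ge_iff_le, hc1, hcm]
    · by_cases h2 : tl = []
      · subst h2
        refine ⟨0, by simp [pvScanA, h1], ?_⟩
        by_cases hc0 : c = 0
        · simp [pvAlive, pvScanA, placeBall, hc0]
        · have hbd : ¬ b ≤ d := fun hb => h1 ⟨hb, hc0⟩
          simp [pvAlive, pvScanA, placeBall, ge_iff_le, hbd, hc0]
      · have htl : ∀ t ∈ tl, (0:Int) ≤ t.2.2 := fun u hu => hnn u (List.mem_cons_of_mem _ hu)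
        obtain ⟨v, hv1, hv2⟩ := ih htl h2
        refine ⟨v, by simp [pvScanA, h1, h2, hv1], ?_⟩
        by_cases hc0 : c = 0
        · simp [pvAlive, pvScanA, h1, h2, hc0] at hv2 ⊢
          exact hv2
        · have hbd : ¬ b ≤ d := fun hb => h1 ⟨hb, hc0⟩
          simp [pvAlive, pvScanA, h1, h2, hc0, placeBall, ge_iff_le, hbd] at hv2 ⊢
          simp [hv2]

theorem scan_nonneg (b : Int) :
    ∀ M : List (Int × Int × Int), (∀ t ∈ M, 0 ≤ t.2.2) → ∀ t ∈ (pvScanA b M).2, 0 ≤ t.2.2 := by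
  intro M
  induction M with
  | nil => intro _ t ht; simp [pvScanA] at ht
  | cons hd tl ih =>
    intro hnn t ht
    obtain ⟨d, p, c⟩ := hd
    have hc : (0:Int) ≤ c := hnn (d, p, c) (by simp)
    by_cases h1 : b ≤ d ∧ c ≠ 0
    · simp only [pvScanA, if_pos h1] at ht
      rcases List.mem_cons.mp ht with h | h
      · subst h; simp only; omega
      · exact hnn t (List.mem_cons_of_mem _ h)
    · by_cases h2 : tl = []
      · subst h2
        simp only [pvScanA, if_neg h1] at ht
        rcases List.mem_cons.mp ht with h | h
        · subst h; exact hc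
        · simp at h
      · simp only [pvScanA, if_neg h1, if_neg h2] at ht
        rcases List.mem_cons.mp ht with h | h
        · subst h; exact hc
        · exact ih (fun u hu => hnn u (List.mem_cons_of_mem _ hu)) t h

theorem scan_shape (b : Int) :
    ∀ M : List (Int × Int × Int),
      ((pvScanA b M).2).length = M.length ∧
      ∀ k (h1 : k < ((pvScanA b M).2).length) (h2 : k < M.length),
        ((pvScanA b M).2)[k].1 = M[k].1 ∧ ((pvScanA b M).2)[k].2.1 = M[k].2.1 := by
  intro M
  induction M with
  | nil => simp [pvScanA]
  | cons hd tl ih =>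
    obtain ⟨d, p, c⟩ := hd
    by_cases h1 : b ≤ d ∧ c ≠ 0
    · simp only [pvScanA, if_pos h1]
      refine ⟨by simp, ?_⟩
      intro k hk1 hk2
      cases k with
      | zero => simp
      | succ k => simp
    · by_cases h2 : tl = []
      · subst h2; simp [pvScanA, if_neg h1]
      · simp only [pvScanA, if_neg h1, if_neg h2]
        refine ⟨by simp [ih.1], ?_⟩
        intro k hk1 hk2
        cases k with
        | zero => simp
        | succ k =>
          simp only [List.getElem_cons_succ]
          exact ih.2 k (by simpa using hk1) (by simpa using hk2)

-- rebuild: the scanned triple list is again pvTrips of its own capacity list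
theorem trips_of_scan (holes c : List Int) (b : Int) :
    (pvScanA b ((pvTrips holes c).reverse)).2 =
      (pvTrips holes ((((pvScanA b ((pvTrips holes c).reverse)).2).reverse).map (fun t => t.2.2))).reverse := by
  have hlenM : ((pvTrips holes c).reverse).length = holes.length := by simp [pvTrips]
  have hshape := scan_shape b ((pvTrips holes c).reverse)
  set N := (pvScanA b ((pvTrips holes c).reverse)).2 with hN
  have hlenN : N.length = holes.length := by rw [hshape.1, hlenM]
  have key : N.reverse = pvTrips holes ((N.reverse).map (fun t => t.2.2)) := by
    apply List.ext_getElem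
    · simp [pvTrips, hlenN]
    · intro k h1 h2
      have hk : k < holes.length := by simpa [hlenN] using h1
      have hj : N.length - 1 - k < N.length := by omega
      have hjM : N.length - 1 - k < ((pvTrips holes c).reverse).length := by omega
      have hrev : N.reverse[k] = N[N.length - 1 - k] := by
        simp [List.getElem_reverse]
      have hcomp := hshape.2 (N.length - 1 - k) hj (by omega)
      have hMk : ((pvTrips holes c).reverse)[N.length - 1 - k] = (pvTrips holes c)[k]'(by simp [pvTrips]; omega) := by
        have : (pvTrips holes c).length - 1 - (N.length - 1 - k) = k := by
          simp [pvTrips] at *; omega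
        simp [List.getElem_reverse, this]
      have htr : (pvTrips holes c)[k]'(by simp [pvTrips]; omega) =
          (holes.getD k 0, (k : Int) + 1, c.getD k 0) := by
        simp [pvTrips]
      have h2' : k < (pvTrips holes ((N.reverse).map (fun t => t.2.2))).length := h2
      have hrhs : (pvTrips holes ((N.reverse).map (fun t => t.2.2)))[k] =
          (holes.getD k 0, (k : Int) + 1, N.reverse[k].2.2) := by
        have hk' : k < (N.reverse).length := by simp; omega
        simp [pvTrips]
        rw [List.getElem?_eq_getElem (by simp; omega)]
        simp [List.getElem_reverse]
      rw [hrhs, hrev]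
      rw [hMk, htr] at hcomp
      exact Prod.ext hcomp.1 (Prod.ext hcomp.2 rfl)
  rw [← key, List.reverse_reverse]

theorem fold_eq (holes : List Int) (hn : holes ≠ []) :
    ∀ (balls : List Int) (c : List Int) (acc : List Int),
      c.length = holes.length → (∀ x ∈ c, 0 ≤ x) →
      (balls.foldl (fun st b =>
          match ballPositionFinderInner holes st.1 (PySem.List.pyRange 1 ((holes.length : Int) + 1) 1) b holes.length 1 with
          | (some v, c') => (c', st.2 ++ [v])
          | (none, c') => (c', st.2)) (c, acc)).2 =
      (balls.foldl (fun st b =>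
          let r := placeBall b st.1
          (r.2, st.2 ++ [r.1])) (pvAlive ((pvTrips holes c).reverse), acc)).2 := by
  intro balls
  induction balls with
  | nil => intro c acc _ _; rfl
  | cons b bs ih =>
    intro c acc hlen hnn
    have hM : ((pvTrips holes c).reverse).length = holes.length := by simp [pvTrips]
    have hMne : (pvTrips holes c).reverse ≠ [] := by
      intro h
      have := congrArg List.length h
      simp [pvTrips] at this
      exact hn this
    have hMnn : ∀ t ∈ (pvTrips holes c).reverse, (0:Int) ≤ t.2.2 := by
      intro t ht
      rw [List.mem_reverse] at ht
      simp only [pvTrips, List.mem_map, List.mem_range] at ht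
      obtain ⟨k, hk, rfl⟩ := ht
      have hkc : k < c.length := by omega
      have hget : (0:Int) ≤ c.getD k 0 := by
        rw [List.getD_eq_getElem?_getD, List.getElem?_eq_getElem hkc, Option.getD_some]
        exact hnn _ (List.getElem_mem hkc)
      exact hget
    have hinner := inner_eq holes c _ b hlen rfl holes.length 1 (le_refl 1) (by omega)
    obtain ⟨v, hv1, hv2⟩ := scan_place b ((pvTrips holes c).reverse) hMnn hMne
    have hshape := scan_shape b ((pvTrips holes c).reverse)
    set N := (pvScanA b ((pvTrips holes c).reverse)).2 with hN
    have hnewlen : ((N.reverse).map (fun t => t.2.2)).length = holes.length := by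
      simp [hshape.1, hM]
    have hnewnn : ∀ x ∈ (N.reverse).map (fun t => t.2.2), (0:Int) ≤ x := by
      intro x hx
      simp only [List.mem_map, List.mem_reverse] at hx
      obtain ⟨t, ht, rfl⟩ := hx
      exact scan_nonneg b ((pvTrips holes c).reverse) hMnn t ht
    simp only [List.foldl_cons]
    rw [hinner]
    simp only [Nat.sub_self, List.take_zero, List.drop_zero, List.nil_append]
    rw [hv1]
    rw [hv2]
    rw [ih ((N.reverse).map (fun t => t.2.2)) (acc ++ [v]) hnewlen hnewnn]
    congr 2
    rw [← trips_of_scan holes c b]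

-- ===== VERDICT (by name: the statement is the Claim_ definition above) =====
theorem init_caps_pos (n : Nat) : ∀ x ∈ PySem.List.pyRange 1 ((n : Int) + 1) 1, (0:Int) ≤ x := by
  intro x hx
  have := (PySem.List.mem_pyRange_one).mp hx
  omega

theorem init_len (n : Nat) : (PySem.List.pyRange 1 ((n : Int) + 1) 1).length = n := by
  simp [PySem.List.length_pyRange_one]

theorem init_alive (holes : List Int) :
    pvAlive ((pvTrips holes (PySem.List.pyRange 1 ((holes.length : Int) + 1) 1)).reverse) =
      (List.range holes.length).reverse.map
        (fun k => (holes.getD k 0, (k : Int) + 1, (k : Int) + 1)) := by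
  have htr : pvTrips holes (PySem.List.pyRange 1 ((holes.length : Int) + 1) 1) =
      (List.range holes.length).map (fun k => (holes.getD k 0, (k : Int) + 1, (k : Int) + 1)) := by
    apply List.map_congr_left
    intro k hk
    rw [List.mem_range] at hk
    have hkl : k < (PySem.List.pyRange 1 ((holes.length : Int) + 1) 1).length := by
      rw [init_len]; omega
    have : (PySem.List.pyRange 1 ((holes.length : Int) + 1) 1).getD k 0 = (k : Int) + 1 := by
      rw [List.getD_eq_getElem?_getD, List.getElem?_eq_getElem hkl, Option.getD_some,
        PySem.List.getElem_pyRange_one]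
      omega
    rw [this]
  rw [htr]
  have hall : pvAlive (((List.range holes.length).map
      (fun k => (holes.getD k 0, (k : Int) + 1, (k : Int) + 1))).reverse) =
      ((List.range holes.length).map
      (fun k => (holes.getD k 0, (k : Int) + 1, (k : Int) + 1))).reverse := by
    apply List.filter_eq_self.mpr
    intro t ht
    rw [List.mem_reverse, List.mem_map] at ht
    obtain ⟨k, hk, rfl⟩ := ht
    simp only [bne_iff_ne, ne_eq]
    intro h
    omega
  rw [hall, List.map_reverse]

theorem ballPositionFinder_spec : Claim_unchanged_ballPositionFinder := by
  intro holes balls _ hnd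
  by_cases hh : holes = []
  · subst hh
    have hb : balls = [] := by
      by_contra hb
      exact hnd ⟨rfl, hb⟩
    subst hb
    rfl
  · have h0 := fold_eq holes hh balls (PySem.List.pyRange 1 ((holes.length : Int) + 1) 1) []
      (init_len holes.length) (init_caps_pos holes.length)
    show ballPositionFinder holes balls = ballPositionFinder_alt holes balls
    unfold ballPositionFinder ballPositionFinder_alt
    rw [h0, init_alive]

theorem ballPositionFinder_changed : Claim_changed_ballPositionFinder := by
  unfold Claim_changed_ballPositionFinder; decide

theorem emptyA (bs : List Int) : ∀ st : List Int × List Int,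
    (bs.foldl (fun st b =>
      match ballPositionFinderInner ([] : List Int) st.1 (PySem.List.pyRange 1 ((0 : Int) + 1) 1) b 0 1 with
      | (some v, c') => (c', st.2 ++ [v])
      | (none, c') => (c', st.2)) st).2 = st.2 := by
  induction bs with
  | nil => intro st; rfl
  | cons b bs ih =>
    intro st
    simp only [List.foldl_cons, ballPositionFinderInner]
    exact ih _

theorem emptyB (bs : List Int) : ∀ acc : List Int,
    (bs.foldl (fun st b =>
      let r := placeBall b st.1
      (r.2, st.2 ++ [r.1])) (([] : List (Int × Int × Int)), acc)).2 = acc ++ bs.map (fun _ => 0) := by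
  induction bs with
  | nil => intro acc; simp
  | cons b bs ih =>
    intro acc
    simp only [List.foldl_cons, placeBall, List.map_cons]
    rw [ih (acc ++ [0])]
    simp

theorem ballPositionFinder_tight : Claim_exact_ballPositionFinder := by
  intro holes balls _ hD
  have hD' : holes = [] ∧ balls ≠ [] := hD
  obtain ⟨h1, h2⟩ := hD'
  subst h1
  have hA : ballPositionFinder [] balls = [] := by
    unfold ballPositionFinder
    exact emptyA balls _
  have hB : ballPositionFinder_alt [] balls = balls.map (fun _ => 0) := by
    unfold ballPositionFinder_alt
    simp only [List.length_nil, List.range_zero, List.reverse_nil, List.map_nil]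
    exact emptyB balls []
  rw [hA, hB]
  intro h
  have := congrArg List.length h
  simp at this
  exact h2 (List.eq_nil_of_length_eq_zero this.symm)
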